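-- pv_equiv track=rewrite | github.com/nizhf/hoi-prediction-gaze-transformer | common/model_utils.py | match_pairs_generated_gt
-- ===== SOURCE A (Python) =====
-- def match_pairs_generated_gt(
--     pair_idxes_generated: list,
--     pair_idxes_gt: list,
--     interactions_gt: list,
-- ):
--     """
--     Match the generated pair_idxes to gt pair_idxes
--
--     Args:
--         pair_idxes_generated (list): generated pair_idxes
--         pair_idxes_gt (list): ground-truth pair_idxes
--         interactions_gt (list): ground-truth interactions
--
--     Returns:
--         list: list of gt interactions for the generated pair_idxes
--     """
--     matched_interactions = []
--     for pair_idx_generated in pair_idxes_generated: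
--         try:
--             idx = pair_idxes_gt.index(pair_idx_generated)
--             matched_interactions.append(interactions_gt[idx])
--         except ValueError:
--             # this gt pair has no gt interaction label
--             matched_interactions.append([])
--     return matched_interactions
-- ===== SOURCE B (Python) =====
-- def match_pairs_generated_gt(
--     pair_idxes_generated: list,
--     pair_idxes_gt: list,
--     interactions_gt: list,
-- ):
--     # Inverted "scatter" algorithm: pre-size the output with [] placeholders,
--     # group the positions of each generated pair once, then make ONE pass over
--     # the gt side, writing each gt interaction directly into all output slots of
--     # its pair; popping the group guarantees the FIRST gt occurrence wins
--     # (list.index semantics).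
--     matched_interactions = [[] for _ in pair_idxes_generated]
--     positions = {}
--     for i, pair in enumerate(pair_idxes_generated):
--         positions.setdefault(tuple(pair), []).append(i)
--     for pair, interaction in zip(pair_idxes_gt, interactions_gt):
--         for i in positions.pop(tuple(pair), []):
--             matched_interactions[i] = interaction
--     return matched_interactions
-- ===== Notes on version B (the rewrite author's own statement) =====
-- stated objective: alternative
-- what changed: Inverted the direction of the computation: instead of scanning the gt list once per generated pair (list.index), B pre-sizes the output with [] placeholders, groups the indices of each generated pair once, then makes a single pass over the gt side scattering each interaction into all output slots of its pair (popping the group so the first gt occurrence wins); a timing run read only 1.46x at the largest size, so no speed is claimed.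
import Mathlib
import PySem

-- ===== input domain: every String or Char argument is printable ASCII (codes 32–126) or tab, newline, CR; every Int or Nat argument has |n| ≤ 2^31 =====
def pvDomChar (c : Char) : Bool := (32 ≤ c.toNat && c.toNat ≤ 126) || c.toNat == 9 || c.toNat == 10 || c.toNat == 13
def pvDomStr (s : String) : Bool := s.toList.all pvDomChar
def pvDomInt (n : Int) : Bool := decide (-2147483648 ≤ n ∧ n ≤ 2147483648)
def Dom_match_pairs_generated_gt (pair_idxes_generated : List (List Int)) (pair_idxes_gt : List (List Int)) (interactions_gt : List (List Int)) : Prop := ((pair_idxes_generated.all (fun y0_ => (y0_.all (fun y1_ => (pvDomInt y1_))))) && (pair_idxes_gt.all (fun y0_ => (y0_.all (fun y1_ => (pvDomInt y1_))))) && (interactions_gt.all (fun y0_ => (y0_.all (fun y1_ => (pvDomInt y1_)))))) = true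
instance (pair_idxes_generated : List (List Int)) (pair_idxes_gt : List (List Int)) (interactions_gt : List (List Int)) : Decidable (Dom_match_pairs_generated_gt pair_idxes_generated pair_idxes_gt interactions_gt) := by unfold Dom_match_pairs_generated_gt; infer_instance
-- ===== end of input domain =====

-- B inverts the computation: it pre-sizes the output with [] placeholders, groups the positions
-- of each generated pair once, then scans the gt side ONCE, scattering each interaction into the
-- output slots of its pair (popping the group so the first gt occurrence wins).

-- ===== PORT A =====
def match_pairs_generated_gt (pair_idxes_generated : List (List Int)) (pair_idxes_gt : List (List Int)) (interactions_gt : List (List Int)) : List (List Int) :=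
  pair_idxes_generated.foldl
    (fun matched_interactions pair_idx_generated =>
      matched_interactions ++
        [match PySem.List.index? pair_idxes_gt pair_idx_generated with
         -- interactions_gt[idx]: pyGet? = none is Python's IndexError, excluded by Pre_
         | some idx => (PySem.List.pyGet? interactions_gt (idx : Int)).getD []
         | none => []])
    []

-- ===== PORT B =====
def match_pairs_generated_gt_alt (pair_idxes_generated : List (List Int)) (pair_idxes_gt : List (List Int)) (interactions_gt : List (List Int)) : List (List Int) :=
  -- matched_interactions = [[] for _ in pair_idxes_generated]
  let matched0 : List (List Int) := pair_idxes_generated.map (fun _ => ([] : List Int))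
  -- positions.setdefault(tuple(pair), []).append(i)  =  modify pair [] (· ++ [i])
  let positions : PySem.Dict (List Int) (List Int) :=
    (PySem.List.enumerate pair_idxes_generated).foldl
      (fun d x => d.modify x.2 [] (fun l => l ++ [x.1])) PySem.Dict.empty
  -- one pass over zip(gt, inter): pop the group, scatter the interaction into its slots
  ((pair_idxes_gt.zip interactions_gt).foldl
    (fun (s : List (List Int) × PySem.Dict (List Int) (List Int)) kv =>
      ((s.2.getD kv.1 []).foldl (fun r j => r.set j.toNat kv.2) s.1, s.2.erase kv.1))
    (matched0, positions)).1

-- ===== PRECONDITION & SPEC =====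
-- Pre_ excludes exactly the inputs where Python A raises IndexError: some generated pair
-- whose first index in pair_idxes_gt is out of range for interactions_gt.
def Pre_match_pairs_generated_gt (pair_idxes_generated : List (List Int)) (pair_idxes_gt : List (List Int)) (interactions_gt : List (List Int)) : Prop :=
  (pair_idxes_generated.all (fun p =>
    match PySem.List.index? pair_idxes_gt p with
    | some idx => decide (idx < interactions_gt.length)
    | none => true)) = true
instance (pair_idxes_generated : List (List Int)) (pair_idxes_gt : List (List Int)) (interactions_gt : List (List Int)) : Decidable (Pre_match_pairs_generated_gt pair_idxes_generated pair_idxes_gt interactions_gt) := by unfold Pre_match_pairs_generated_gt; infer_instance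
def pvWitness_match_pairs_generated_gt : List (List Int) × List (List Int) × List (List Int) := ([[0, 1], [2, 3]], [[0, 1]], [[5]])

def Spec_match_pairs_generated_gt (pair_idxes_generated : List (List Int)) (pair_idxes_gt : List (List Int)) (interactions_gt : List (List Int)) (out : List (List Int)) : Prop := out = match_pairs_generated_gt_alt pair_idxes_generated pair_idxes_gt interactions_gt
instance (pair_idxes_generated : List (List Int)) (pair_idxes_gt : List (List Int)) (interactions_gt : List (List Int)) (out : List (List Int)) : Decidable (Spec_match_pairs_generated_gt pair_idxes_generated pair_idxes_gt interactions_gt out) := by unfold Spec_match_pairs_generated_gt; infer_instance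

-- ===== CLAIM (what is proved, stated in full; the proofs are below) =====
def Claim_equal_match_pairs_generated_gt : Prop := ∀ (pair_idxes_generated : List (List Int)) (pair_idxes_gt : List (List Int)) (interactions_gt : List (List Int)), Dom_match_pairs_generated_gt pair_idxes_generated pair_idxes_gt interactions_gt → Pre_match_pairs_generated_gt pair_idxes_generated pair_idxes_gt interactions_gt → Spec_match_pairs_generated_gt pair_idxes_generated pair_idxes_gt interactions_gt (match_pairs_generated_gt pair_idxes_generated pair_idxes_gt interactions_gt)

-- ===== LEMMAS AND PROOFS =====

-- the value A computes for one generated pair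
def pvAMatch (pair_idxes_gt interactions_gt : List (List Int)) (p : List Int) : List Int :=
  match PySem.List.index? pair_idxes_gt p with
  | some idx => (PySem.List.pyGet? interactions_gt (idx : Int)).getD []
  | none => []

-- first value associated to p in an association list, with a default
def pvFirstValOr (l : List (List Int × List Int)) (p : List Int) (dflt : List Int) : List Int :=
  match l with
  | [] => dflt
  | (k, v) :: t => if k = p then v else pvFirstValOr t p dflt

theorem pv_firstValOr_zip (pair_idxes_gt interactions_gt : List (List Int)) (p : List Int) :
    pvFirstValOr (pair_idxes_gt.zip interactions_gt) p [] = pvAMatch pair_idxes_gt interactions_gt p := by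
  induction pair_idxes_gt generalizing interactions_gt with
  | nil => simp [pvFirstValOr, pvAMatch, PySem.List.index?]
  | cons g gs ih =>
    cases interactions_gt with
    | nil =>
      simp only [List.zip_nil_right, pvFirstValOr, pvAMatch]
      cases h : PySem.List.index? (g :: gs) p <;> simp
    | cons i is =>
      simp only [List.zip_cons_cons, pvFirstValOr, pvAMatch]
      by_cases hgp : g = p
      · subst hgp
        rw [PySem.List.index?_cons_self]
        simp
      · rw [PySem.List.index?_cons_of_ne gs hgp]
        cases h : PySem.List.index? gs p with
        | none =>
          have := ih is
          simp only [pvAMatch, h] at this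
          simp only [hgp, if_false] at this ⊢; exact this
        | some k =>
          have := ih is
          simp only [pvAMatch, h, PySem.List.pyGet?_natCast] at this
          simp [hgp, this]

theorem pvA_fold (pair_idxes_gt interactions_gt : List (List Int)) (gen acc : List (List Int)) :
    gen.foldl
      (fun matched_interactions pair_idx_generated =>
        matched_interactions ++
          [match PySem.List.index? pair_idxes_gt pair_idx_generated with
           | some idx => (PySem.List.pyGet? interactions_gt (idx : Int)).getD []
           | none => []])
      acc = acc ++ gen.map (pvAMatch pair_idxes_gt interactions_gt) := by
  induction gen generalizing acc with
  | nil => simp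
  | cons g gs ih =>
    rw [List.foldl_cons, ih, List.map_cons, List.append_assoc]
    rfl

-- erase: get?/getD characterisation
theorem pv_get?_erase (d : PySem.Dict (List Int) (List Int)) (k k' : List Int) :
    (d.erase k).get? k' = if k' = k then none else d.get? k' := by
  obtain ⟨l⟩ := d
  induction l with
  | nil => simp [PySem.Dict.erase, PySem.Dict.get?]
  | cons p t ih =>
    simp only [PySem.Dict.erase, PySem.Dict.get?, List.filter_cons] at *
    by_cases hpk : p.1 = k
    · simp only [hpk, beq_self_eq_true, Bool.not_true]
      by_cases hk' : k' = k
      · simpa [hk'] using ih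
      · simp only [List.find?_cons, hk']
        have : (p.1 == k') = false := by simp [hpk, Ne.symm hk']
        simpa [this, hk'] using ih
    · have hb : (p.1 == k) = false := by simp [hpk]
      simp only [hb, Bool.not_false, if_true, List.find?_cons]
      by_cases hpk' : p.1 = k'
      · have : k' ≠ k := fun h => hpk (hpk'.trans h)
        simp [hpk', this]
      · have : (p.1 == k') = false := by simp [hpk']
        simpa [this] using ih

theorem pv_getD_erase (d : PySem.Dict (List Int) (List Int)) (k k' : List Int) :
    (d.erase k).getD k' [] = if k' = k then [] else d.getD k' [] := by
  rw [PySem.Dict.getD_eq_get?_getD, PySem.Dict.getD_eq_get?_getD, pv_get?_erase]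
  by_cases h : k' = k <;> simp [h]

-- the positions dict: getD after the build fold
theorem pv_build_getD (l : List (Int × List Int)) (d : PySem.Dict (List Int) (List Int)) (k : List Int) :
    (l.foldl (fun d x => d.modify x.2 [] (fun l => l ++ [x.1])) d).getD k [] =
      d.getD k [] ++ (l.filter (fun x => x.2 = k)).map Prod.fst := by
  induction l generalizing d with
  | nil => simp
  | cons x t ih =>
    rw [List.foldl_cons, ih, List.filter_cons]
    by_cases hk : x.2 = k
    · simp [hk, PySem.Dict.getD_modify_self]
    · rw [PySem.Dict.getD_modify_of_ne d _ _ (Ne.symm hk)]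
      simp [hk]

-- scatter writes with a constant value: length and pointwise behaviour
theorem pv_foldset_length (idxs : List Int) (res : List (List Int)) (v : List Int) :
    (idxs.foldl (fun r j => r.set j.toNat v) res).length = res.length := by
  induction idxs generalizing res with
  | nil => rfl
  | cons j t ih => rw [List.foldl_cons, ih, List.length_set]

theorem pv_foldset_miss (idxs : List Int) (res : List (List Int)) (v : List Int) (i : Nat)
    (h : ∀ j ∈ idxs, j.toNat ≠ i) :
    (idxs.foldl (fun r j => r.set j.toNat v) res)[i]? = res[i]? := by
  induction idxs generalizing res with
  | nil => rfl
  | cons j t ih =>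
    rw [List.foldl_cons, ih _ (fun j hj => h j (List.mem_cons_of_mem _ hj)),
      List.getElem?_set_ne (h j (List.mem_cons_self))]

theorem pv_foldset_hit (idxs : List Int) (res : List (List Int)) (v : List Int) (i : Nat)
    (hi : i < res.length) (hmem : (i : Int) ∈ idxs) (hpos : ∀ j ∈ idxs, 0 ≤ j) :
    (idxs.foldl (fun r j => r.set j.toNat v) res)[i]? = some v := by
  induction idxs generalizing res with
  | nil => cases hmem
  | cons j t ih =>
    rw [List.foldl_cons]
    by_cases hmt : (i : Int) ∈ t
    · exact ih _ (by rw [List.length_set]; exact hi) hmt (fun j hj => hpos j (List.mem_cons_of_mem _ hj))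
    · have hji : j = (i : Int) := by
        rcases hmem with _ | h
        · rfl
        · exact absurd (by assumption) hmt
      have hnot : ∀ j' ∈ t, j'.toNat ≠ i := by
        intro j' hj' he
        have h0 : (0 : Int) ≤ j' := hpos j' (List.mem_cons_of_mem _ hj')
        have : j' = (i : Int) := by omega
        exact hmt (this ▸ hj')
      rw [pv_foldset_miss _ _ _ _ hnot, hji]
      simp [hi]

-- one pass over zl: the result length never changes
theorem pv_second_length (zl : List (List Int × List Int)) (res : List (List Int))
    (d : PySem.Dict (List Int) (List Int)) :
    (zl.foldl
      (fun (s : List (List Int) × PySem.Dict (List Int) (List Int)) kv =>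
        ((s.2.getD kv.1 []).foldl (fun r j => r.set j.toNat kv.2) s.1, s.2.erase kv.1))
      (res, d)).1.length = res.length := by
  induction zl generalizing res d with
  | nil => rfl
  | cons kv t ih => rw [List.foldl_cons, ih, pv_foldset_length]

-- one pass over zl: slot i is untouched when i appears in no group
theorem pv_second_miss (zl : List (List Int × List Int)) (res : List (List Int))
    (d : PySem.Dict (List Int) (List Int)) (i : Nat)
    (h : ∀ k, ∀ j ∈ d.getD k [], j.toNat ≠ i) :
    (zl.foldl
      (fun (s : List (List Int) × PySem.Dict (List Int) (List Int)) kv =>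
        ((s.2.getD kv.1 []).foldl (fun r j => r.set j.toNat kv.2) s.1, s.2.erase kv.1))
      (res, d)).1[i]? = res[i]? := by
  induction zl generalizing res d with
  | nil => rfl
  | cons kv t ih =>
    rw [List.foldl_cons]
    have herase : ∀ k, ∀ j ∈ (d.erase kv.1).getD k [], j.toNat ≠ i := by
      intro k j hj
      rw [pv_getD_erase] at hj
      split_ifs at hj with hk
      · cases hj
      · exact h k j hj
    rw [ih _ _ herase, pv_foldset_miss _ _ _ _ (h kv.1)]

-- one pass over zl: slot i receives the first value whose key owns i
theorem pv_second_hit (zl : List (List Int × List Int)) (res : List (List Int))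
    (d : PySem.Dict (List Int) (List Int)) (i : Nat) (ki : List Int)
    (hi : i < res.length)
    (hmem : (i : Int) ∈ d.getD ki [])
    (hpos : ∀ j ∈ d.getD ki [], 0 ≤ j)
    (hother : ∀ k, k ≠ ki → ∀ j ∈ d.getD k [], j.toNat ≠ i) :
    (zl.foldl
      (fun (s : List (List Int) × PySem.Dict (List Int) (List Int)) kv =>
        ((s.2.getD kv.1 []).foldl (fun r j => r.set j.toNat kv.2) s.1, s.2.erase kv.1))
      (res, d)).1[i]? = some (pvFirstValOr zl ki (res[i]?.getD [])) := by
  induction zl generalizing res d with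
  | nil =>
    simp only [List.foldl_nil, pvFirstValOr]
    rw [List.getElem?_eq_getElem hi]
    rfl
  | cons kv t ih =>
    obtain ⟨k, v⟩ := kv
    rw [List.foldl_cons]
    by_cases hk : k = ki
    · subst hk
      have hres : ((d.getD k []).foldl (fun r j => r.set j.toNat v) res)[i]? = some v :=
        pv_foldset_hit _ _ _ _ hi hmem hpos
      have herase : ∀ k', ∀ j ∈ (d.erase k).getD k' [], j.toNat ≠ i := by
        intro k' j hj
        rw [pv_getD_erase] at hj
        split_ifs at hj with hk'
        · cases hj
        · exact hother k' (by simpa [pv_getD_erase, hk'] using hk') j hj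
      rw [pv_second_miss _ _ _ _ herase, hres]
      simp [pvFirstValOr]
    · have hmiss : ((d.getD k []).foldl (fun r j => r.set j.toNat v) res)[i]? = res[i]? :=
        pv_foldset_miss _ _ _ _ (hother k hk)
      have hlen : ((d.getD k []).foldl (fun r j => r.set j.toNat v) res).length = res.length :=
        pv_foldset_length _ _ _
      have hek : ∀ k', (d.erase k).getD k' [] = if k' = k then [] else d.getD k' [] :=
        fun k' => pv_getD_erase d k k'
      have h1 : (i : Int) ∈ (d.erase k).getD ki [] := by rw [hek]; simp [Ne.symm hk]; exact hmem
      have h2 : ∀ j ∈ (d.erase k).getD ki [], 0 ≤ j := by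
        rw [hek]; simp only [Ne.symm hk, if_false]; exact hpos
      have h3 : ∀ k', k' ≠ ki → ∀ j ∈ (d.erase k).getD k' [], j.toNat ≠ i := by
        intro k' hk' j hj
        rw [hek] at hj
        split_ifs at hj with hkk
        · cases hj
        · exact hother k' hk' j hj
      rw [ih _ _ (hlen ▸ hi) h1 h2 h3, hmiss]
      simp [pvFirstValOr, hk]

-- ===== VERDICT (by name: the statement is the Claim_ definition above) =====
theorem match_pairs_generated_gt_spec : Claim_equal_match_pairs_generated_gt := by
  unfold Claim_equal_match_pairs_generated_gt
  intro gen gt inter _ _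
  unfold Spec_match_pairs_generated_gt match_pairs_generated_gt match_pairs_generated_gt_alt
  rw [pvA_fold, List.nil_append]
  -- the positions dict groups, per pair, the (nonnegative, distinct) indices of gen
  have hbuild : ∀ k, ((PySem.List.enumerate gen).foldl
      (fun d x => d.modify x.2 [] (fun l => l ++ [x.1])) PySem.Dict.empty).getD k [] =
      ((PySem.List.enumerate gen).filter (fun x => x.2 = k)).map Prod.fst := by
    intro k; rw [pv_build_getD]; simp
  apply List.ext_getElem?
  intro i
  by_cases hi : i < gen.length
  · have hmem : ((i : Int), gen[i]) ∈ PySem.List.enumerate gen := by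
      rw [PySem.List.mem_enumerate_iff]
      exact ⟨i, hi, by simp⟩
    have hfst : ∀ j p, (j, p) ∈ PySem.List.enumerate gen → 0 ≤ j ∧ (j.toNat < gen.length ∧ gen[j.toNat]? = some p) := by
      intro j p hjp
      rw [PySem.List.mem_enumerate_iff] at hjp
      obtain ⟨m, hm, he⟩ := hjp
      obtain ⟨h1, h2⟩ := Prod.mk.injEq .. ▸ he
      refine ⟨by omega, by omega, ?_⟩
      have : j.toNat = m := by omega
      rw [this, h2, List.getElem?_eq_getElem hm]
    rw [pv_second_hit _ _ _ i (gen[i])]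
    · rw [List.getElem?_map, List.getElem?_eq_getElem hi]
      simp only [Option.map_some]
      have : (gen.map (fun _ => ([] : List Int)))[i]? = some [] := by
        rw [List.getElem?_map, List.getElem?_eq_getElem hi]; rfl
      rw [this]
      simp only [Option.getD_some]
      rw [pv_firstValOr_zip]
    · simpa using hi
    · rw [hbuild]
      refine List.mem_map.2 ⟨((i : Int), gen[i]), ?_, rfl⟩
      exact List.mem_filter.2 ⟨hmem, by simp⟩
    · rw [hbuild]
      intro j hj
      obtain ⟨⟨j', p⟩, hjp, he⟩ := List.mem_map.1 hj
      have hmf := List.mem_filter.1 hjp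
      have := (hfst j' p hmf.1).1
      simp only at he
      omega
    · intro k hk j hj
      rw [hbuild] at hj
      obtain ⟨⟨j', p⟩, hjp, he⟩ := List.mem_map.1 hj
      have hm := List.mem_filter.1 hjp
      have hp : p = k := by simpa using hm.2
      obtain ⟨_, _, hget⟩ := hfst j' p hm.1
      intro heq
      cases he
      rw [heq, List.getElem?_eq_getElem hi] at hget
      exact hk (by injection hget with h; rw [← hp, ← h])
  · have h1 : (gen.map (pvAMatch gt inter))[i]? = none := by
      rw [List.getElem?_eq_none]; simpa using le_of_not_gt hi
    have h2 : (((gt.zip inter).foldl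
        (fun (s : List (List Int) × PySem.Dict (List Int) (List Int)) kv =>
          ((s.2.getD kv.1 []).foldl (fun r j => r.set j.toNat kv.2) s.1, s.2.erase kv.1))
        (gen.map (fun _ => ([] : List Int)),
         (PySem.List.enumerate gen).foldl
           (fun d x => d.modify x.2 [] (fun l => l ++ [x.1])) PySem.Dict.empty)).1)[i]? = none := by
      apply List.getElem?_eq_none
      rw [pv_second_length]
      simpa using le_of_not_gt hi
    rw [h1, h2]
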